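-- pv_equiv track=rewrite | github.com/Keliver/- | python/tool.py | NumToAngle
-- ===== SOURCE A (Python) =====
-- def NumToAngle(num):
--     list=[]
--     if num<0:
--         num=1296000+num
--     if num>=1296000:
--         num=num%1296000
--     for i in range(3):
--         if i <=1:
--             list.append(num%60)
--         else:
--             list.append(num)
--         num=num//60
--     strlist=str(list[2]) + " " + str(list[1]) + " " + str(list[0])
--     return strlist
-- ===== SOURCE B (Python) =====
-- def _render(n, unit):
--     # render n in mixed units (unit, unit//60, ..., 1), most-significant first
--     if unit <= 1:
--         return str(n)
--     return str(n // unit) + " " + _render(n % unit, unit // 60)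
--
-- def NumToAngle(num):
--     if num < 0:
--         num = 1296000 + num
--     if num >= 1296000:
--         num = num % 1296000
--     return _render(num, 3600)
-- ===== Notes on version B (the rewrite author's own statement) =====
-- stated objective: alternative
-- what changed: Replaces A's bottom-up loop (repeated //60 collecting least-significant digits into a list, then indexing the list back-to-front) with a top-down recursive renderer that peels the most significant unit first (str(n//unit) then recurse on n%unit with unit//60), building the string directly with no list.
import Mathlib
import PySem

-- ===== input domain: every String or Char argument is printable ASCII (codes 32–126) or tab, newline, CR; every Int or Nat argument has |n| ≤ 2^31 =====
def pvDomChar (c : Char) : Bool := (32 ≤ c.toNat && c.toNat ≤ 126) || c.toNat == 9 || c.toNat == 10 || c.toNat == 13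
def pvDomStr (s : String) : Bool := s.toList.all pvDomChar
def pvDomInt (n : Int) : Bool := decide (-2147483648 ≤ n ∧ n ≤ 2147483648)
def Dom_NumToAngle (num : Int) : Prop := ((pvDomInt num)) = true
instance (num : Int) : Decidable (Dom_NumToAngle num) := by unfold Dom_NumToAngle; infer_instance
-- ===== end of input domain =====

-- B replaces A's bottom-up digit-collecting loop with a top-down recursive renderer; objective: alternative decomposition.

-- ===== PORT A =====
def NumToAngle (num : Int) : String :=
  let num := if num < 0 then 1296000 + num else num
  let num := if num ≥ 1296000 then PySem.Int.mod num 1296000 else num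
  let st : List Int × Int :=
    (PySem.List.pyRange 0 3 1).foldl (fun st i =>
      let lst := if i ≤ 1 then st.1 ++ [PySem.Int.mod st.2 60] else st.1 ++ [st.2]
      (lst, PySem.Int.floordiv st.2 60)) ([], num)
  PySem.Int.toStr ((PySem.List.pyGet? st.1 2).getD 0) ++ " " ++
    PySem.Int.toStr ((PySem.List.pyGet? st.1 1).getD 0) ++ " " ++
    PySem.Int.toStr ((PySem.List.pyGet? st.1 0).getD 0)

-- ===== PORT B =====
-- top-down renderer: most significant unit first, recurse on the remainder with unit//60
def pvRender (n unit : Int) : String :=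
  if h : unit ≤ 1 then PySem.Int.toStr n
  else
    PySem.Int.toStr (PySem.Int.floordiv n unit) ++ " " ++
      pvRender (PySem.Int.mod n unit) (PySem.Int.floordiv unit 60)
termination_by unit.toNat
decreasing_by
  have := PySem.Int.floordiv_eq_ediv_of_pos (a := unit) (show (0:Int) < 60 by norm_num)
  omega

def NumToAngle_alt (num : Int) : String :=
  let num := if num < 0 then 1296000 + num else num
  let num := if num ≥ 1296000 then PySem.Int.mod num 1296000 else num
  pvRender num 3600

-- ===== PRECONDITION & SPEC =====
def Spec_NumToAngle (num : Int) (out : String) : Prop := out = NumToAngle_alt num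
instance (num : Int) (out : String) : Decidable (Spec_NumToAngle num out) := by unfold Spec_NumToAngle; infer_instance

-- ===== CLAIM (what is proved, stated in full; the proofs are below) =====
def Claim_equal_NumToAngle : Prop := ∀ (num : Int), Dom_NumToAngle num → Spec_NumToAngle num (NumToAngle num)

-- ===== LEMMAS AND PROOFS =====
theorem pvRender_3600 (n : Int) :
    pvRender n 3600 =
      PySem.Int.toStr (n / 3600) ++ " " ++ PySem.Int.toStr (n % 3600 / 60) ++ " " ++
        PySem.Int.toStr (n % 3600 % 60) := by
  rw [pvRender]; norm_num
  rw [pvRender]; norm_num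
  rw [pvRender]; norm_num
  simp [PySem.Int.floordiv_eq_ediv_of_pos (show (0:Int) < 3600 by norm_num),
    PySem.Int.floordiv_eq_ediv_of_pos (show (0:Int) < 60 by norm_num),
    PySem.Int.mod_eq_emod_of_pos (show (0:Int) < 3600 by norm_num), String.append_assoc]

theorem core_eq (m : Int) :
    PySem.Int.toStr (m / 60 / 60) ++ " " ++ PySem.Int.toStr (m / 60 % 60) ++ " " ++
        PySem.Int.toStr (m % 60) = pvRender m 3600 := by
  rw [pvRender_3600]
  have h1 : m / 60 / 60 = m / 3600 := by omega
  have h2 : m / 60 % 60 = m % 3600 / 60 := by omega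
  have h3 : m % 60 = m % 3600 % 60 := by omega
  rw [h1, h2, h3]

-- ===== VERDICT (by name: the statement is the Claim_ definition above) =====
theorem NumToAngle_spec : Claim_equal_NumToAngle := by
  intro num _
  show NumToAngle num = NumToAngle_alt num
  unfold NumToAngle NumToAngle_alt
  simp only [show PySem.List.pyRange 0 3 1 = [0, 1, 2] from by decide, List.foldl]
  norm_num [PySem.List.pyGet?, PySem.List.pyIdx?,
    PySem.Int.floordiv_eq_ediv_of_pos (show (0:Int) < 60 by norm_num),
    PySem.Int.mod_eq_emod_of_pos (show (0:Int) < 60 by norm_num), Int.toNat]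
  exact core_eq _
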